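-- pv_equiv track=rewrite | github.com/shayu01/agentcloak | src/agentcloak/browser/_snapshot_builder.py | _extract_focus_subtree
-- ===== SOURCE A (Python) =====
-- def _extract_focus_subtree(
--     lines: list[tuple[int, str, int | None]],
--     target_ref: int,
-- ) -> list[tuple[int, str, int | None]]:
--     target_idx = -1
--     for i, (_, _, ref) in enumerate(lines):
--         if ref == target_ref:
--             target_idx = i
--             break
--     if target_idx < 0:
--         return lines
--
--     target_depth = lines[target_idx][0]
--
--     ancestors: list[int] = []
--     search_depth = target_depth
--     for i in range(target_idx - 1, -1, -1):
--         if lines[i][0] < search_depth: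
--             ancestors.append(i)
--             search_depth = lines[i][0]
--             if search_depth == 0:
--                 break
--     ancestors.reverse()
--
--     subtree: list[int] = [target_idx]
--     for i in range(target_idx + 1, len(lines)):
--         if lines[i][0] > target_depth:
--             subtree.append(i)
--         else:
--             break
--
--     result_indices = ancestors + subtree
--     return [lines[i] for i in result_indices]
-- ===== SOURCE B (Python) =====
-- def _extract_focus_subtree(
--     lines: list[tuple[int, str, int | None]],
--     target_ref: int,
-- ) -> list[tuple[int, str, int | None]]:
--     # Single forward pass: maintain a monotone stack of candidate-ancestor
--     # indices (strictly increasing depths).  At the first matching ref,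
--     # snapshot the stack (cut at a depth-0 root, as the chain ends there)
--     # and extend with the contiguous deeper block that follows.
--     stack: list[int] = []
--     for i, (depth, _, ref) in enumerate(lines):
--         while stack and lines[stack[-1]][0] >= depth:
--             stack.pop()
--         if ref == target_ref:
--             anc: list[int] = []
--             for a in reversed(stack):  # deepest candidate first
--                 anc.append(a)
--                 if lines[a][0] == 0:   # reached a root line: chain ends
--                     break
--             anc.reverse()
--             j = i + 1
--             while j < len(lines) and lines[j][0] > depth:
--                 j += 1
--             return [lines[a] for a in anc] + lines[i:j]
--         stack.append(i)
--     return lines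
-- ===== Notes on version B (the rewrite author's own statement) =====
-- stated objective: alternative
-- what changed: Replaces A's find-then-backward-ancestor-scan with a single forward pass that maintains a monotone stack of candidate-ancestor indices, snapshotting the stack (cut at a depth-0 root) at the first matching ref and slicing the contiguous deeper block that follows.
import Mathlib
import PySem

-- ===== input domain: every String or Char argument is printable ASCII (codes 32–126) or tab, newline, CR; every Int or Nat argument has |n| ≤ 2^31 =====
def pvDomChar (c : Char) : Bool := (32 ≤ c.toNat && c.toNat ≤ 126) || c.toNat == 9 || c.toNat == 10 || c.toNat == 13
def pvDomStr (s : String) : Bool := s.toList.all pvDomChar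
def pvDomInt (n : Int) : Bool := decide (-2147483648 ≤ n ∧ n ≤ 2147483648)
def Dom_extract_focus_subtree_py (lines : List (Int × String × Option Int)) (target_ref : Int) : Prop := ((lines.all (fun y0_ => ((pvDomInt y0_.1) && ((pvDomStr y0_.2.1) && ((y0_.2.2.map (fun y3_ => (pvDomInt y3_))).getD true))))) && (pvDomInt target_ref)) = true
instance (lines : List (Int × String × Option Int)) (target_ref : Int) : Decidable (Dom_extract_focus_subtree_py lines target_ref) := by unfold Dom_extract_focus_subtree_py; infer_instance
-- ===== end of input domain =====

-- B replaces A's backward ancestor scan by a single forward monotone-stack pass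
-- (objective: alternative — a different traversal/data structure, same cost).

-- shared trivial accessor: lines[k] (both ports only use in-range indices)
def pvLine (lines : List (Int × String × Option Int)) (k : Nat) : Int × String × Option Int :=
  lines.getD k (0, "", none)

def pvDepth (lines : List (Int × String × Option Int)) (k : Nat) : Int :=
  (pvLine lines k).1

-- ===== PORT A =====
-- the first for-loop with break: first index (counting from i) whose ref == target_ref
def pvA_find (ls : List (Int × String × Option Int)) (target_ref : Int) (i : Nat) : Option Nat :=
  match ls with
  | [] => none
  | (_, _, r) :: rest => if r = some target_ref then some i else pvA_find rest target_ref (i + 1)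

-- the backward ancestor loop; returns python's `ancestors` BEFORE its reverse()
def pvA_anc (lines : List (Int × String × Option Int)) : Nat → Int → List Nat
  | 0, _ => []
  | i + 1, s =>
    if pvDepth lines i < s then
      i :: (if pvDepth lines i = 0 then [] else pvA_anc lines i (pvDepth lines i))
    else
      pvA_anc lines i s

-- the forward subtree loop (indices after target_idx)
def pvA_sub (lines : List (Int × String × Option Int)) (td : Int) (i : Nat) : List Nat :=
  if _h : i < lines.length then
    if td < pvDepth lines i then i :: pvA_sub lines td (i + 1) else []
  else []
termination_by lines.length - i

def extract_focus_subtree_py (lines : List (Int × String × Option Int)) (target_ref : Int) : List (Int × String × Option Int) :=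
  match pvA_find lines target_ref 0 with
  | none => lines
  | some t =>
    let td := pvDepth lines t
    let ancestors := (pvA_anc lines t td).reverse
    let subtree := t :: pvA_sub lines td (t + 1)
    (ancestors ++ subtree).map (pvLine lines)

-- ===== PORT B =====
-- Source B's stack is kept head-as-top here (python's stack[-1] is the head)
-- Source B's `for a in reversed(stack): anc.append(a); if depth==0: break` (anc before its reverse())
def pvB_caz (lines : List (Int × String × Option Int)) : List Nat → List Nat
  | [] => []
  | a :: rest => if pvDepth lines a = 0 then [a] else a :: pvB_caz lines rest

-- Source B's `j = i+1; while j < len(lines) and lines[j][0] > depth: j += 1`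
def pvB_end (lines : List (Int × String × Option Int)) (td : Int) (j : Nat) : Nat :=
  if h : j < lines.length ∧ td < pvDepth lines j then pvB_end lines td (j + 1) else j
termination_by lines.length - j
decreasing_by omega

def pvB_loop (lines : List (Int × String × Option Int)) (target_ref : Int) (i : Nat) (stack : List Nat) : List (Int × String × Option Int) :=
  if _h : i < lines.length then
    let depth := pvDepth lines i
    let stack' := stack.dropWhile (fun a => decide (depth ≤ pvDepth lines a))
    if (pvLine lines i).2.2 = some target_ref then
      let anc := (pvB_caz lines stack').reverse
      let j := pvB_end lines depth (i + 1)
      -- lines[i:j] with 0 ≤ i ≤ j ≤ len: exactly drop i / take (j-i)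
      anc.map (pvLine lines) ++ ((lines.drop i).take (j - i))
    else
      pvB_loop lines target_ref (i + 1) (i :: stack')
  else lines
termination_by lines.length - i

def extract_focus_subtree_py_alt (lines : List (Int × String × Option Int)) (target_ref : Int) : List (Int × String × Option Int) :=
  pvB_loop lines target_ref 0 []

-- ===== PRECONDITION & SPEC =====
def Spec_extract_focus_subtree_py (lines : List (Int × String × Option Int)) (target_ref : Int) (out : List (Int × String × Option Int)) : Prop := out = extract_focus_subtree_py_alt lines target_ref
instance (lines : List (Int × String × Option Int)) (target_ref : Int) (out : List (Int × String × Option Int)) : Decidable (Spec_extract_focus_subtree_py lines target_ref out) := by unfold Spec_extract_focus_subtree_py; infer_instance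

-- ===== CLAIM (what is proved, stated in full; the proofs are below) =====
def Claim_equal_extract_focus_subtree_py : Prop := ∀ (lines : List (Int × String × Option Int)) (target_ref : Int), Dom_extract_focus_subtree_py lines target_ref → Spec_extract_focus_subtree_py lines target_ref (extract_focus_subtree_py lines target_ref)

-- ===== LEMMAS AND PROOFS =====

-- index-based reformulation of A's find loop
def pvFindFrom (lines : List (Int × String × Option Int)) (target_ref : Int) (i : Nat) : Option Nat :=
  if _h : i < lines.length then
    if (pvLine lines i).2.2 = some target_ref then some i else pvFindFrom lines target_ref (i + 1)
  else none
termination_by lines.length - i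

-- A's backward ancestor chain WITHOUT the depth-0 break
def pvCnb (lines : List (Int × String × Option Int)) : Nat → Int → List Nat
  | 0, _ => []
  | i + 1, s => if pvDepth lines i < s then i :: pvCnb lines i (pvDepth lines i) else pvCnb lines i s

theorem pv_find_bridge (lines : List (Int × String × Option Int)) (tr : Int) :
    ∀ m i, lines.length - i ≤ m → pvA_find (lines.drop i) tr i = pvFindFrom lines tr i := by
  intro m
  induction m with
  | zero =>
    intro i hi
    rw [List.drop_of_length_le (by omega)]
    rw [pvFindFrom]
    simp [pvA_find, dif_neg (by omega : ¬ i < lines.length)]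
  | succ m ih =>
    intro i hi
    by_cases h : i < lines.length
    · rw [List.drop_eq_getElem_cons h, pvFindFrom, dif_pos h]
      have hl : pvLine lines i = lines[i] := by
        simp [pvLine, List.getD_eq_getElem?_getD, List.getElem?_eq_getElem h]
      rw [pvA_find]
      rw [hl]
      by_cases hr : lines[i].2.2 = some tr
      · simp [hr]
      · simp only [hr]
        exact ih (i + 1) (by omega)
    · rw [List.drop_of_length_le (by omega), pvFindFrom]
      simp [pvA_find, dif_neg h]

theorem pv_dw_dw {α : Type} (p q : α → Bool) (h : ∀ x, p x = true → q x = true) (l : List α) :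
    (l.dropWhile p).dropWhile q = l.dropWhile q := by
  induction l with
  | nil => rfl
  | cons x xs ih =>
    by_cases hp : p x = true
    · rw [List.dropWhile_cons_of_pos hp, List.dropWhile_cons_of_pos (h x hp), ih]
    · rw [List.dropWhile_cons_of_neg hp]

def pvInv (lines : List (Int × String × Option Int)) (i : Nat) (stack : List Nat) : Prop :=
  ∀ s : Int, stack.dropWhile (fun a => decide (s ≤ pvDepth lines a)) = pvCnb lines i s

theorem pvInv_zero (lines : List (Int × String × Option Int)) : pvInv lines 0 [] := by
  intro s; rfl

theorem pvInv_step (lines : List (Int × String × Option Int)) (i : Nat) (stack : List Nat)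
    (h : pvInv lines i stack) :
    pvInv lines (i + 1) (i :: stack.dropWhile (fun a => decide (pvDepth lines i ≤ pvDepth lines a))) := by
  intro s
  rw [h (pvDepth lines i)]
  by_cases hlt : pvDepth lines i < s
  · rw [List.dropWhile_cons_of_neg (by simp; omega)]
    simp [pvCnb, hlt]
  · rw [List.dropWhile_cons_of_pos (by simp; omega)]
    have := pv_dw_dw (fun a => decide (pvDepth lines i ≤ pvDepth lines a))
      (fun a => decide (s ≤ pvDepth lines a)) (by intro x hx; simp at hx ⊢; omega) stack
    rw [← h (pvDepth lines i), this, h s]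
    simp [pvCnb, hlt]

theorem pv_caz_cnb (lines : List (Int × String × Option Int)) :
    ∀ i s, pvB_caz lines (pvCnb lines i s) = pvA_anc lines i s := by
  intro i
  induction i with
  | zero => intro s; rfl
  | succ i ih =>
    intro s
    by_cases hlt : pvDepth lines i < s
    · rw [pvCnb, pvA_anc, if_pos hlt, if_pos hlt, pvB_caz]
      by_cases h0 : pvDepth lines i = 0
      · simp [h0]
      · simp [h0, ih]
    · rw [pvCnb, pvA_anc, if_neg hlt, if_neg hlt, ih]

theorem pvB_end_ge (lines : List (Int × String × Option Int)) (td : Int) :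
    ∀ j, j ≤ pvB_end lines td j := by
  intro j
  induction hk : lines.length - j using Nat.strong_induction_on generalizing j with
  | _ k ih =>
    rw [pvB_end]
    by_cases h : j < lines.length ∧ td < pvDepth lines j
    · rw [dif_pos h]
      have := ih (lines.length - (j + 1)) (by omega) (j + 1) rfl
      omega
    · rw [dif_neg h]

theorem pv_subtree (lines : List (Int × String × Option Int)) (td : Int) :
    ∀ m i, lines.length - i ≤ m →
      (pvA_sub lines td i).map (pvLine lines) = (lines.drop i).take (pvB_end lines td i - i) := by
  intro m
  induction m with
  | zero =>
    intro i hi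
    rw [pvA_sub, dif_neg (by omega : ¬ i < lines.length), List.drop_of_length_le (by omega)]
    simp
  | succ m ih =>
    intro i hi
    by_cases h : i < lines.length
    · by_cases hd : td < pvDepth lines i
      · rw [pvA_sub, dif_pos h, if_pos hd, pvB_end, dif_pos ⟨h, hd⟩]
        have hge := pvB_end_ge lines td (i + 1)
        rw [List.drop_eq_getElem_cons h]
        have : pvB_end lines td (i + 1) - i = (pvB_end lines td (i + 1) - (i + 1)) + 1 := by omega
        rw [this, List.take_succ_cons, List.map_cons, ih (i + 1) (by omega)]
        congr 1
        simp [pvLine, List.getD_eq_getElem?_getD, List.getElem?_eq_getElem h]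
      · rw [pvA_sub, dif_pos h, if_neg hd, pvB_end, dif_neg (by tauto)]
        simp
    · rw [pvA_sub, dif_neg h, List.drop_of_length_le (by omega)]
      simp

theorem pv_key (lines : List (Int × String × Option Int)) (tr : Int) :
    ∀ m i stack, lines.length - i ≤ m → pvInv lines i stack →
      pvB_loop lines tr i stack =
        match pvFindFrom lines tr i with
        | none => lines
        | some t =>
          ((pvA_anc lines t (pvDepth lines t)).reverse ++ t :: pvA_sub lines (pvDepth lines t) (t + 1)).map (pvLine lines) := by
  intro m
  induction m with
  | zero =>
    intro i stack hi _
    rw [pvB_loop, dif_neg (by omega : ¬ i < lines.length), pvFindFrom,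
      dif_neg (by omega : ¬ i < lines.length)]
  | succ m ih =>
    intro i stack hi hinv
    by_cases h : i < lines.length
    · rw [pvB_loop, dif_pos h, pvFindFrom, dif_pos h]
      by_cases hr : (pvLine lines i).2.2 = some tr
      · simp only [hr, if_true]
        show _ = List.map (pvLine lines) ((pvA_anc lines i (pvDepth lines i)).reverse ++ i :: pvA_sub lines (pvDepth lines i) (i + 1))
        rw [hinv (pvDepth lines i), pv_caz_cnb, List.map_append]
        congr 1
        have hge : i + 1 ≤ pvB_end lines (pvDepth lines i) (i + 1) := pvB_end_ge lines _ (i + 1)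
        rw [List.map_cons, List.drop_eq_getElem_cons h]
        have hsp : pvB_end lines (pvDepth lines i) (i + 1) - i
            = (pvB_end lines (pvDepth lines i) (i + 1) - (i + 1)) + 1 := by omega
        rw [hsp, List.take_succ_cons, pv_subtree lines (pvDepth lines i) (lines.length - (i + 1)) (i + 1) (by omega)]
        congr 1
        simp [pvLine, List.getD_eq_getElem?_getD, List.getElem?_eq_getElem h]
      · simp only [hr, if_false]
        rw [ih (i + 1) _ (by omega) (pvInv_step lines i stack hinv)]
    · rw [pvB_loop, dif_neg h, pvFindFrom, dif_neg h]

-- ===== VERDICT (by name: the statement is the Claim_ definition above) =====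
theorem extract_focus_subtree_py_spec : Claim_equal_extract_focus_subtree_py := by
  unfold Claim_equal_extract_focus_subtree_py
  intro lines tr _
  unfold Spec_extract_focus_subtree_py extract_focus_subtree_py extract_focus_subtree_py_alt
  rw [pv_key lines tr lines.length 0 [] (by omega) (pvInv_zero lines)]
  rw [← pv_find_bridge lines tr lines.length 0 (by omega), List.drop_zero]
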